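-- pv_equiv track=rewrite | github.com/mml555/jewgo-app | final_batch_update.py | generate_description_for_restaurant
-- ===== SOURCE A (Python) =====
-- from typing import Dict, List
--
-- def generate_description_for_restaurant(restaurant: Dict) -> str:
--     """Generate a description based on restaurant name and type"""
--     name = restaurant['name'].lower()
--
--     # Bakery/Bread shops
--     if 'bread' in name or 'bakery' in name:
--         return f"Kosher bakery specializing in fresh-baked breads, pastries, and baked goods. Traditional recipes with modern twists."
--
--     # Cake/Dessert shops
--     elif any(word in name for word in ['cake', 'dessert', 'cupcake', 'cheesecake']):
--         return f"Kosher dessert shop offering fresh-baked cakes, pastries, and sweet treats. Perfect for celebrations and special occasions."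
--
--     # Meat/Butcher shops
--     elif any(word in name for word in ['butcher', 'meat', 'carnicery']):
--         return f"Kosher butcher shop offering premium cuts of meat, poultry, and deli items. Certified kosher with highest quality standards."
--
--     # Market/Grocery
--     elif any(word in name for word in ['market', 'grocery', 'foods']):
--         return f"Kosher grocery market offering fresh produce, packaged goods, and specialty items. One-stop shop for kosher groceries."
--
--     # Grill/Restaurant
--     elif any(word in name for word in ['grill', 'steakhouse', 'kitchen']):
--         return f"Kosher restaurant specializing in grilled dishes and traditional Jewish cuisine. Quality ingredients and family-friendly atmosphere."
--
--     # General restaurants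
--     else:
--         return f"Authentic kosher restaurant serving traditional Jewish cuisine. Features fresh ingredients and welcoming atmosphere."
-- ===== SOURCE B (Python) =====
-- # Different algorithm: instead of scanning the name once per keyword, slide a window over
-- # the name and look each candidate slice up in a keyword->priority hash map, keeping the
-- # minimum priority seen; the answer is descriptions[min priority] (index 5 = default).
-- _KW = {
--     'bread': 0, 'bakery': 0,
--     'cake': 1, 'dessert': 1, 'cupcake': 1, 'cheesecake': 1,
--     'butcher': 2, 'meat': 2, 'carnicery': 2,
--     'market': 3, 'grocery': 3, 'foods': 3,
--     'grill': 4, 'steakhouse': 4, 'kitchen': 4,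
-- }
-- _LENS = [4, 5, 6, 7, 9, 10]  # the distinct keyword lengths
-- _DESCS = [
--     "Kosher bakery specializing in fresh-baked breads, pastries, and baked goods. Traditional recipes with modern twists.",
--     "Kosher dessert shop offering fresh-baked cakes, pastries, and sweet treats. Perfect for celebrations and special occasions.",
--     "Kosher butcher shop offering premium cuts of meat, poultry, and deli items. Certified kosher with highest quality standards.",
--     "Kosher grocery market offering fresh produce, packaged goods, and specialty items. One-stop shop for kosher groceries.",
--     "Kosher restaurant specializing in grilled dishes and traditional Jewish cuisine. Quality ingredients and family-friendly atmosphere.",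
--     "Authentic kosher restaurant serving traditional Jewish cuisine. Features fresh ingredients and welcoming atmosphere.",
-- ]
--
-- def generate_description_for_restaurant(restaurant):
--     name = restaurant['name'].lower()
--     best = 5
--     for i in range(len(name)):
--         for L in _LENS:
--             p = _KW.get(name[i:i + L])
--             if p is not None and p < best:
--                 best = p
--     return _DESCS[best]
-- ===== Notes on version B (the rewrite author's own statement) =====
-- stated objective: alternative
-- what changed: Instead of scanning the name once per keyword (15 substring searches), B slides a window over the name and looks each candidate slice up in a keyword->priority hash map, keeping the minimum priority found; the answer is a description list indexed by that priority.
import Mathlib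
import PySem

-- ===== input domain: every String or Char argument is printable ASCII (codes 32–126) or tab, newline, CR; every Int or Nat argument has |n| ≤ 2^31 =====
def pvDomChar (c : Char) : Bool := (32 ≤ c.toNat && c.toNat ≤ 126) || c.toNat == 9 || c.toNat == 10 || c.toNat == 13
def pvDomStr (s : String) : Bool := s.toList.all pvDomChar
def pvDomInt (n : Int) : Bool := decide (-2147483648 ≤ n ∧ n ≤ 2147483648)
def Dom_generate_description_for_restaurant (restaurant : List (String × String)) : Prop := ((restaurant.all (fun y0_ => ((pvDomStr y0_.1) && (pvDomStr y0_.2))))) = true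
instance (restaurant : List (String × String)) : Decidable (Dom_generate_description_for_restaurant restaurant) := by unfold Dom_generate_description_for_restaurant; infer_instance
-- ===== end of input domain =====

-- B replaces A's per-keyword substring scans by a sliding window over the name with a
-- keyword->priority hash-map lookup, returning the description of the minimum priority found
-- (objective: alternative algorithm).


-- ===== PORT A =====
-- Literal port of A's if/elif chain; the 'none' arm of the dict lookup is unreachable under Pre_ (Python raises KeyError there).
def generate_description_for_restaurant (restaurant : List (String × String)) : String :=
  match (PySem.Dict.mk restaurant).get? "name" with
  | none => ""
  | some s =>
    let name := PySem.Str.lower s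
    if PySem.Str.isIn "bread" name || PySem.Str.isIn "bakery" name then
      "Kosher bakery specializing in fresh-baked breads, pastries, and baked goods. Traditional recipes with modern twists."
    else if (["cake", "dessert", "cupcake", "cheesecake"] : List String).any (fun w => PySem.Str.isIn w name) then
      "Kosher dessert shop offering fresh-baked cakes, pastries, and sweet treats. Perfect for celebrations and special occasions."
    else if (["butcher", "meat", "carnicery"] : List String).any (fun w => PySem.Str.isIn w name) then
      "Kosher butcher shop offering premium cuts of meat, poultry, and deli items. Certified kosher with highest quality standards."
    else if (["market", "grocery", "foods"] : List String).any (fun w => PySem.Str.isIn w name) then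
      "Kosher grocery market offering fresh produce, packaged goods, and specialty items. One-stop shop for kosher groceries."
    else if (["grill", "steakhouse", "kitchen"] : List String).any (fun w => PySem.Str.isIn w name) then
      "Kosher restaurant specializing in grilled dishes and traditional Jewish cuisine. Quality ingredients and family-friendly atmosphere."
    else
      "Authentic kosher restaurant serving traditional Jewish cuisine. Features fresh ingredients and welcoming atmosphere."

-- ===== PORT B =====
-- B works on the lowercased name's characters: string ops in PySem are defined on List Char,
-- and name[i:i+L] with 0 ≤ i, L is exactly (cs.drop i).take L (PySem.List.slice_natCast_add).
def pvKW : PySem.Dict (List Char) Nat := PySem.Dict.mk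
  [ ("bread".toList, 0), ("bakery".toList, 0),
    ("cake".toList, 1), ("dessert".toList, 1), ("cupcake".toList, 1), ("cheesecake".toList, 1),
    ("butcher".toList, 2), ("meat".toList, 2), ("carnicery".toList, 2),
    ("market".toList, 3), ("grocery".toList, 3), ("foods".toList, 3),
    ("grill".toList, 4), ("steakhouse".toList, 4), ("kitchen".toList, 4) ]

def pvLens : List Nat := [4, 5, 6, 7, 9, 10]

def pvDescs : List String :=
  [ "Kosher bakery specializing in fresh-baked breads, pastries, and baked goods. Traditional recipes with modern twists.",
    "Kosher dessert shop offering fresh-baked cakes, pastries, and sweet treats. Perfect for celebrations and special occasions.",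
    "Kosher butcher shop offering premium cuts of meat, poultry, and deli items. Certified kosher with highest quality standards.",
    "Kosher grocery market offering fresh produce, packaged goods, and specialty items. One-stop shop for kosher groceries.",
    "Kosher restaurant specializing in grilled dishes and traditional Jewish cuisine. Quality ingredients and family-friendly atmosphere.",
    "Authentic kosher restaurant serving traditional Jewish cuisine. Features fresh ingredients and welcoming atmosphere." ]

-- the body of B's inner loop: try one window length L at position i
def pvStepL (cs : List Char) (i : Nat) (b : Nat) (L : Nat) : Nat :=
  match pvKW.get? ((cs.drop i).take L) with
  | some p => if p < b then p else b
  | none => b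

-- the body of B's outer loop: all window lengths at position i
def pvScanPos (cs : List Char) (best : Nat) (i : Nat) : Nat :=
  pvLens.foldl (pvStepL cs i) best

def generate_description_for_restaurant_alt (restaurant : List (String × String)) : String :=
  match (PySem.Dict.mk restaurant).get? "name" with
  | none => ""
  | some s =>
    let cs := (PySem.Str.lower s).toList
    let best := (List.range cs.length).foldl (pvScanPos cs) 5
    pvDescs.getD best ""

-- ===== PRECONDITION & SPEC =====
-- Pre_ excludes dicts without a 'name' key, on which Python A raises KeyError.
def Pre_generate_description_for_restaurant (restaurant : List (String × String)) : Prop :=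
  ((PySem.Dict.mk restaurant).get? "name").isSome = true
instance (restaurant : List (String × String)) : Decidable (Pre_generate_description_for_restaurant restaurant) := by unfold Pre_generate_description_for_restaurant; infer_instance

def pvWitness_generate_description_for_restaurant : (List (String × String)) := [("name", "Best Bread Bakery")]

def Spec_generate_description_for_restaurant (restaurant : List (String × String)) (out : String) : Prop := out = generate_description_for_restaurant_alt restaurant
instance (restaurant : List (String × String)) (out : String) : Decidable (Spec_generate_description_for_restaurant restaurant out) := by unfold Spec_generate_description_for_restaurant; infer_instance

-- ===== CLAIM (what is proved, stated in full; the proofs are below) =====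
def Claim_equal_generate_description_for_restaurant : Prop := ∀ (restaurant : List (String × String)), Dom_generate_description_for_restaurant restaurant → Pre_generate_description_for_restaurant restaurant → Spec_generate_description_for_restaurant restaurant (generate_description_for_restaurant restaurant)

-- ===== LEMMAS AND PROOFS =====

-- A's keyword groups, on the char-list side, indexed by priority
def pvCat : Nat → List (List Char)
  | 0 => ["bread".toList, "bakery".toList]
  | 1 => ["cake".toList, "dessert".toList, "cupcake".toList, "cheesecake".toList]
  | 2 => ["butcher".toList, "meat".toList, "carnicery".toList]
  | 3 => ["market".toList, "grocery".toList, "foods".toList]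
  | 4 => ["grill".toList, "steakhouse".toList, "kitchen".toList]
  | _ => []

def pvFound (p : Nat) (cs : List Char) : Prop := ∃ w ∈ pvCat p, w <:+: cs

-- a successful lookup names a keyword of that priority
lemma pvLookup_inv (x : List Char) (p : Nat) (h : pvKW.get? x = some p) :
    p < 5 ∧ x ∈ pvCat p := by
  have hm := PySem.Dict.mem_items_of_get?_eq_some pvKW h
  simp only [pvKW, List.mem_cons, List.not_mem_nil, or_false, Prod.mk.injEq] at hm
  rcases hm with ⟨rfl,rfl⟩|⟨rfl,rfl⟩|⟨rfl,rfl⟩|⟨rfl,rfl⟩|⟨rfl,rfl⟩|⟨rfl,rfl⟩|⟨rfl,rfl⟩|⟨rfl,rfl⟩|⟨rfl,rfl⟩|⟨rfl,rfl⟩|⟨rfl,rfl⟩|⟨rfl,rfl⟩|⟨rfl,rfl⟩|⟨rfl,rfl⟩|⟨rfl,rfl⟩ <;>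
    exact ⟨by norm_num, by simp [pvCat]⟩

-- every keyword looks itself up at its own priority
lemma pvLookup_self (p : Nat) (w : List Char) (hp : p < 5) (hw : w ∈ pvCat p) :
    pvKW.get? w = some p := by
  interval_cases p <;> simp [pvCat] at hw <;>
    rcases hw with rfl | rfl | rfl | rfl <;> decide

lemma pvStepL_le (cs : List Char) (i b L : Nat) : pvStepL cs i b L ≤ b := by
  unfold pvStepL
  cases pvKW.get? ((cs.drop i).take L) with
  | none => exact le_refl b
  | some p => dsimp; split <;> omega

lemma pvFoldL_le (cs : List Char) (i : Nat) :
    ∀ (lens : List Nat) (b : Nat), lens.foldl (pvStepL cs i) b ≤ b := by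
  intro lens
  induction lens with
  | nil => intro b; exact le_refl b
  | cons a t ih =>
    intro b
    exact le_trans (ih (pvStepL cs i b a)) (pvStepL_le cs i b a)

lemma pvFoldL_lookup (cs : List Char) (i : Nat) (p : Nat) :
    ∀ (lens : List Nat) (b : Nat) (L : Nat), L ∈ lens →
      pvKW.get? ((cs.drop i).take L) = some p →
      lens.foldl (pvStepL cs i) b ≤ p := by
  intro lens
  induction lens with
  | nil => intro b L hL; simp at hL
  | cons a t ih =>
    intro b L hL hlk
    rcases List.mem_cons.mp hL with rfl | hLt
    · refine le_trans (pvFoldL_le cs i t (pvStepL cs i b L)) ?_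
      unfold pvStepL
      rw [hlk]
      dsimp; split <;> omega
    · exact ih (pvStepL cs i b a) L hLt hlk

lemma pvScan_le (cs : List Char) :
    ∀ (l : List Nat) (b : Nat), l.foldl (pvScanPos cs) b ≤ b := by
  intro l
  induction l with
  | nil => intro b; exact le_refl b
  | cons a t ih =>
    intro b
    exact le_trans (ih (pvScanPos cs b a)) (pvFoldL_le cs a pvLens b)

lemma pvScan_lookup (cs : List Char) (i L p : Nat) (hL : L ∈ pvLens)
    (hlk : pvKW.get? ((cs.drop i).take L) = some p) :
    ∀ (l : List Nat) (b : Nat), i ∈ l → l.foldl (pvScanPos cs) b ≤ p := by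
  intro l
  induction l with
  | nil => intro b hi; simp at hi
  | cons a t ih =>
    intro b hi
    rcases List.mem_cons.mp hi with rfl | hit
    · exact le_trans (pvScan_le cs t (pvScanPos cs b i))
        (pvFoldL_lookup cs i p pvLens b L hL hlk)
    · exact ih (pvScanPos cs b a) hit

lemma pvFoldL_mem (cs : List Char) (i : Nat) :
    ∀ (lens : List Nat) (b : Nat),
      lens.foldl (pvStepL cs i) b = b ∨
      ∃ L ∈ lens, pvKW.get? ((cs.drop i).take L) = some (lens.foldl (pvStepL cs i) b) := by
  intro lens
  induction lens with
  | nil => intro b; left; rfl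
  | cons a t ih =>
    intro b
    rcases ih (pvStepL cs i b a) with he | ⟨L, hL, hlk⟩
    · rw [List.foldl_cons, he]
      unfold pvStepL
      cases hk : pvKW.get? ((cs.drop i).take a) with
      | none => left; rfl
      | some p =>
        dsimp
        split
        · right; exact ⟨a, List.mem_cons_self .., hk⟩
        · left; rfl
    · right; exact ⟨L, List.mem_cons_of_mem a hL, hlk⟩

lemma pvScan_mem (cs : List Char) :
    ∀ (l : List Nat) (b : Nat),
      l.foldl (pvScanPos cs) b = b ∨
      ∃ i ∈ l, ∃ L ∈ pvLens,
        pvKW.get? ((cs.drop i).take L) = some (l.foldl (pvScanPos cs) b) := by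
  intro l
  induction l with
  | nil => intro b; left; rfl
  | cons a t ih =>
    intro b
    rcases ih (pvScanPos cs b a) with he | ⟨i, hi, L, hL, hlk⟩
    · rw [List.foldl_cons, he]
      rcases pvFoldL_mem cs a pvLens b with he2 | ⟨L, hL, hlk⟩
      · left; exact he2
      · right; exact ⟨a, List.mem_cons_self .., L, hL, hlk⟩
    · right; exact ⟨i, List.mem_cons_of_mem a hi, L, hL, hlk⟩

-- a matching keyword of priority p drives the scan down to ≤ p
lemma pvFound_le (cs : List Char) (p : Nat) (hp : p < 5)
    (hf : pvFound p cs) :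
    (List.range cs.length).foldl (pvScanPos cs) 5 ≤ p := by
  obtain ⟨w, hw, s, t, hst⟩ := hf
  have hlen : w.length ∈ pvLens := by
    interval_cases p <;> simp [pvCat] at hw <;>
      rcases hw with rfl | rfl | rfl | rfl <;> decide
  have hpos : 0 < w.length := by
    simp [pvLens] at hlen; omega
  have hdrop : cs.drop s.length = w ++ t := by
    rw [← hst, List.append_assoc, List.drop_left]
  have htake : (cs.drop s.length).take w.length = w := by
    rw [hdrop, List.take_left]
  have hi : s.length < cs.length := by
    rw [← hst]; simp [List.length_append]; omega
  have hlk : pvKW.get? ((cs.drop s.length).take w.length) = some p := by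
    rw [htake]; exact pvLookup_self p w hp hw
  exact pvScan_lookup cs s.length w.length p hlen hlk
    (List.range cs.length) 5 (List.mem_range.mpr hi)

-- any successful lookup exhibits a matched keyword group
lemma pvLookup_found (cs : List Char) (i L p : Nat)
    (h : pvKW.get? ((cs.drop i).take L) = some p) :
    p < 5 ∧ pvFound p cs := by
  obtain ⟨hp, hmem⟩ := pvLookup_inv _ _ h
  refine ⟨hp, (cs.drop i).take L, hmem, ?_⟩
  exact ((List.take_prefix _ _).isInfix).trans ((List.drop_suffix _ _).isInfix)

lemma pvBest_eq (cs : List Char) (k : Nat) (hk : k < 5) (hfk : pvFound k cs)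
    (hnot : ∀ j < k, ¬ pvFound j cs) :
    (List.range cs.length).foldl (pvScanPos cs) 5 = k := by
  have hle := pvFound_le cs k hk hfk
  rcases pvScan_mem cs (List.range cs.length) 5 with he | ⟨i, _, L, hL, hlk⟩
  · omega
  · obtain ⟨hlt, hf⟩ := pvLookup_found cs i L _ hlk
    by_contra hne
    exact hnot _ (by omega) hf

lemma pvBest_eq5 (cs : List Char) (hnot : ∀ j < 5, ¬ pvFound j cs) :
    (List.range cs.length).foldl (pvScanPos cs) 5 = 5 := by
  rcases pvScan_mem cs (List.range cs.length) 5 with he | ⟨i, _, L, hL, hlk⟩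
  · exact he
  · obtain ⟨hlt, hf⟩ := pvLookup_found cs i L _ hlk
    exact absurd hf (hnot _ hlt)

-- the boolean conditions of A's chain, phrased as pvFound
lemma pvFound0_iff (s : String) :
    pvFound 0 ((PySem.Str.lower s).toList) ↔
      (PySem.Str.isIn "bread" (PySem.Str.lower s) || PySem.Str.isIn "bakery" (PySem.Str.lower s)) = true := by
  simp [pvFound, pvCat, PySem.Chars.isIn_iff_infix]

lemma pvFound1_iff (s : String) :
    pvFound 1 ((PySem.Str.lower s).toList) ↔
      ((["cake", "dessert", "cupcake", "cheesecake"] : List String).any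
        (fun w => PySem.Str.isIn w (PySem.Str.lower s))) = true := by
  simp [pvFound, pvCat, PySem.Chars.isIn_iff_infix]

lemma pvFound2_iff (s : String) :
    pvFound 2 ((PySem.Str.lower s).toList) ↔
      ((["butcher", "meat", "carnicery"] : List String).any
        (fun w => PySem.Str.isIn w (PySem.Str.lower s))) = true := by
  simp [pvFound, pvCat, PySem.Chars.isIn_iff_infix]

lemma pvFound3_iff (s : String) :
    pvFound 3 ((PySem.Str.lower s).toList) ↔
      ((["market", "grocery", "foods"] : List String).any
        (fun w => PySem.Str.isIn w (PySem.Str.lower s))) = true := by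
  simp [pvFound, pvCat, PySem.Chars.isIn_iff_infix]

lemma pvFound4_iff (s : String) :
    pvFound 4 ((PySem.Str.lower s).toList) ↔
      ((["grill", "steakhouse", "kitchen"] : List String).any
        (fun w => PySem.Str.isIn w (PySem.Str.lower s))) = true := by
  simp [pvFound, pvCat, PySem.Chars.isIn_iff_infix]

-- ===== VERDICT (by name: the statement is the Claim_ definition above) =====
theorem generate_description_for_restaurant_spec : Claim_equal_generate_description_for_restaurant := by
  intro restaurant _ _
  unfold Spec_generate_description_for_restaurant
  unfold generate_description_for_restaurant generate_description_for_restaurant_alt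
  cases (PySem.Dict.mk restaurant).get? "name" with
  | none => rfl
  | some s =>
    dsimp only
    split_ifs with h1 h2 h3 h4 h5
    · rw [pvBest_eq ((PySem.Str.lower s).toList) 0 (by norm_num)
        ((pvFound0_iff s).mpr h1) (by omega)]; rfl
    · rw [pvBest_eq ((PySem.Str.lower s).toList) 1 (by norm_num)
        ((pvFound1_iff s).mpr h2)
        (by intro j hj; interval_cases j
            · exact fun hf => h1 ((pvFound0_iff s).mp hf))]; rfl
    · rw [pvBest_eq ((PySem.Str.lower s).toList) 2 (by norm_num)
        ((pvFound2_iff s).mpr h3)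
        (by intro j hj; interval_cases j
            · exact fun hf => h1 ((pvFound0_iff s).mp hf)
            · exact fun hf => h2 ((pvFound1_iff s).mp hf))]; rfl
    · rw [pvBest_eq ((PySem.Str.lower s).toList) 3 (by norm_num)
        ((pvFound3_iff s).mpr h4)
        (by intro j hj; interval_cases j
            · exact fun hf => h1 ((pvFound0_iff s).mp hf)
            · exact fun hf => h2 ((pvFound1_iff s).mp hf)
            · exact fun hf => h3 ((pvFound2_iff s).mp hf))]; rfl
    · rw [pvBest_eq ((PySem.Str.lower s).toList) 4 (by norm_num)
        ((pvFound4_iff s).mpr h5)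
        (by intro j hj; interval_cases j
            · exact fun hf => h1 ((pvFound0_iff s).mp hf)
            · exact fun hf => h2 ((pvFound1_iff s).mp hf)
            · exact fun hf => h3 ((pvFound2_iff s).mp hf)
            · exact fun hf => h4 ((pvFound3_iff s).mp hf))]; rfl
    · rw [pvBest_eq5 ((PySem.Str.lower s).toList)
        (by intro j hj; interval_cases j
            · exact fun hf => h1 ((pvFound0_iff s).mp hf)
            · exact fun hf => h2 ((pvFound1_iff s).mp hf)
            · exact fun hf => h3 ((pvFound2_iff s).mp hf)
            · exact fun hf => h4 ((pvFound3_iff s).mp hf)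
            · exact fun hf => h5 ((pvFound4_iff s).mp hf))]
      rfl
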